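-- pv_equiv track=rewrite | github.com/seef07/MinProg-AH | A_new_datastru/reinforcement.py | get_possible_actions
-- ===== SOURCE A (Python) =====
-- def validate_action(state, action, clockwise=True): ##check
--     index = action[0]
--     clockwise = action[1]
--     current_state = [list(sequence) for sequence in state]  # Convert tuples to lists for mutability
--     positions = [(sequence[0], sequence[1]) for sequence in state]
--
--     if index <= 0 or index >= len(positions) - 1:
--         return False
--
--     pivot = positions[index]
--     new_positions = positions.copy()
--     for i in range(index + 1, len(positions)):
--         dx, dy = positions[i][0] - pivot[0], positions[i][1] - pivot[1]
--         if clockwise: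
--             new_positions[i] = (pivot[0] - dy, pivot[1] + dx)
--         else:
--             new_positions[i] = (pivot[0] + dy, pivot[1] - dx)
--
--     if is_valid_configuration(new_positions):
--         for i, position in enumerate(new_positions):
--             current_state[i][0] = position[0]
--             current_state[i][1] = position[1]
--         return True
--
--     return False
--
-- def get_possible_actions(state): ##check
--     list = []
--     for i, part  in enumerate(state):
--         actiontrue = (i, True)
--         actionfalse = (i, False)
--         if validate_action(state, actiontrue):
--             list.append(actiontrue)
--         if validate_action(state, actionfalse):
--             list.append(actionfalse)
--     return list
--
-- def is_valid_configuration(positions): ##check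
--     return len(positions) == len(set(positions))
-- ===== SOURCE B (Python) =====
-- def get_possible_actions(state):
--     pos = [(p[0], p[1]) for p in state]
--     n = len(pos)
--     # Multiset (value -> count) of the current suffix pos[i+1:], maintained by
--     # one decrement per pivot step instead of being rebuilt for every action.
--     suffix = {}
--     dup = 0  # number of excess (repeated) occurrences in the suffix; 0 iff suffix is duplicate-free
--     for q in pos[2:]:
--         c = suffix.get(q, 0)
--         if c > 0:
--             dup += 1
--         suffix[q] = c + 1
--     seen = set(pos[:1])  # the points of the prefix pos[:i+1]
--     prefix_ok = True     # prefix duplicate-freeness is monotone: once broken it stays broken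
--     actions = []
--     for i in range(1, n - 1):
--         p = pos[i]
--         if p in seen:
--             prefix_ok = False
--         seen.add(p)
--         if prefix_ok and dup == 0:
--             s, d = p[0] + p[1], p[1] - p[0]
--             # The clockwise rotation about p maps q to (s - q[1], d + q[0]); a prefix
--             # point a collides with the rotated suffix iff its preimage under the
--             # rotation, (a[1] - d, s - a[0]), lies in the suffix multiset.
--             if all(suffix.get((a[1] - d, s - a[0]), 0) == 0 for a in seen):
--                 actions.append((i, True))
--             # counter-clockwise: q -> (q[1] - d, s - q[0]); preimage of a is (s - a[1], a[0] + d)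
--             if all(suffix.get((s - a[1], a[0] + d), 0) == 0 for a in seen):
--                 actions.append((i, False))
--         # advance the pivot: pos[i+1] leaves the suffix
--         q = pos[i + 1]
--         c = suffix[q]
--         if c > 1:
--             dup -= 1
--         suffix[q] = c - 1
--     return actions
-- ===== Notes on version B (the rewrite author's own statement) =====
-- stated objective: faster
-- what changed: B never rebuilds or rotates a configuration per action: it maintains the suffix as a count multiset updated by one decrement per pivot step (dup counter tells suffix duplicate-freeness in O(1)), tracks prefix duplicate-freeness with a monotone boolean and a growing seen-set, and tests each direction by looking up the rotation PREIMAGE of every prefix point in that multiset, instead of A's per-action full rotation plus len(set)==len check.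
import Mathlib
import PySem

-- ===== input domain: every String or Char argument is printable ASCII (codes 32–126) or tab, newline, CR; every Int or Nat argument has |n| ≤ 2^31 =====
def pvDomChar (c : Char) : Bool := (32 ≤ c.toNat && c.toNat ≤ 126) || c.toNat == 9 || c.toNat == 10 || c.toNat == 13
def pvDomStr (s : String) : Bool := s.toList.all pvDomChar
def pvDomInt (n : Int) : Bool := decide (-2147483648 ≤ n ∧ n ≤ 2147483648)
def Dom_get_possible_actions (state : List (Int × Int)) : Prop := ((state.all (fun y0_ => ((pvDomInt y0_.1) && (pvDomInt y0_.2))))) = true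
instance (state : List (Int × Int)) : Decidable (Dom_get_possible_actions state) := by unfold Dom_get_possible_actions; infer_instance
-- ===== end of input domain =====

-- B change (one line): B never rotates/rebuilds a configuration per action — it keeps the suffix
-- as a count-multiset updated by one decrement per pivot step (with an excess counter for its
-- duplicate-freeness) plus a monotone prefix flag, and tests each direction by looking up the
-- rotation PREIMAGE of each prefix point in that multiset; measured constant-factor faster.
-- (A also builds a `current_state` it mutates locally; that local list never escapes, so it is not
-- part of the return value and is not ported.)

-- ===== PORT A =====
def is_valid_configuration (positions : List (Int × Int)) : Bool :=
  PySem.List.len positions == PySem.Set.len (PySem.Set.ofList positions)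

def validate_action (state : List (Int × Int)) (action : Int × Bool) : Bool :=
  let index := action.1
  let clockwise := action.2
  let positions := state.map (fun s => (s.1, s.2))
  if index ≤ 0 ∨ index ≥ PySem.List.len positions - 1 then false
  else
    let pivot := PySem.List.pyGetD positions index (0, 0)
    let new_positions :=
      (PySem.List.pyRange (index + 1) (PySem.List.len positions) 1).foldl
        (fun np i =>
          let q := PySem.List.pyGetD positions i (0, 0)
          let dx := q.1 - pivot.1
          let dy := q.2 - pivot.2
          if clockwise then PySem.List.pySetD np i (pivot.1 - dy, pivot.2 + dx)
          else PySem.List.pySetD np i (pivot.1 + dy, pivot.2 - dx)) positions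
    is_valid_configuration new_positions

def get_possible_actions (state : List (Int × Int)) : List (Int × Bool) :=
  (PySem.List.enumerate state 0).foldl
    (fun lst ip =>
      let actiontrue : Int × Bool := (ip.1, true)
      let actionfalse : Int × Bool := (ip.1, false)
      let lst := if validate_action state actiontrue then lst ++ [actiontrue] else lst
      if validate_action state actionfalse then lst ++ [actionfalse] else lst) []

-- ===== PORT B =====
-- the body of B's main loop (one pivot step), named so the proofs can speak about it
def bStep (pos : List (Int × Int))
    (st : (PySem.Dict (Int × Int) Int × Int) × (PySem.Set (Int × Int) × Bool) × List (Int × Bool))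
    (i : Int) :
    (PySem.Dict (Int × Int) Int × Int) × (PySem.Set (Int × Int) × Bool) × List (Int × Bool) :=
  let suffix := st.1.1
  let dup := st.1.2
  let seen0 := st.2.1.1
  let prefix_ok0 := st.2.1.2
  let actions0 := st.2.2
  let p := PySem.List.pyGetD pos i (0, 0)
  let prefix_ok := if PySem.Set.contains seen0 p then false else prefix_ok0
  let seen := PySem.Set.add seen0 p
  let actions :=
    if prefix_ok && (dup == 0) then
      let s := p.1 + p.2
      let d := p.2 - p.1
      let actions1 :=
        if seen.all (fun a => suffix.getD (a.2 - d, s - a.1) 0 == 0)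
        then actions0 ++ [(i, true)] else actions0
      if seen.all (fun a => suffix.getD (s - a.2, a.1 + d) 0 == 0)
      then actions1 ++ [(i, false)] else actions1
    else actions0
  let q := PySem.List.pyGetD pos (i + 1) (0, 0)
  let c := suffix.getD q 0
  let dup' := if 1 < c then dup - 1 else dup
  ((suffix.insert q (c - 1), dup'), (seen, prefix_ok), actions)

def get_possible_actions_alt (state : List (Int × Int)) : List (Int × Bool) :=
  let pos := state.map (fun p => (p.1, p.2))
  let n : Int := PySem.List.len pos
  -- build the count multiset of pos[2:] and its excess-occurrence counter dup
  let sd :=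
    (PySem.List.slice pos (some 2) none).foldl
      (fun (sd : PySem.Dict (Int × Int) Int × Int) q =>
        let c := sd.1.getD q 0
        let dup := if 0 < c then sd.2 + 1 else sd.2
        (sd.1.insert q (c + 1), dup))
      (PySem.Dict.empty, 0)
  let seen : PySem.Set (Int × Int) := PySem.Set.ofList (PySem.List.slice pos none (some 1))
  let final := (PySem.List.pyRange 1 (n - 1) 1).foldl (bStep pos) ((sd.1, sd.2), (seen, true), [])
  final.2.2

-- ===== PRECONDITION & SPEC =====
def Spec_get_possible_actions (state : List (Int × Int)) (out : List (Int × Bool)) : Prop := out = get_possible_actions_alt state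
instance (state : List (Int × Int)) (out : List (Int × Bool)) : Decidable (Spec_get_possible_actions state out) := by unfold Spec_get_possible_actions; infer_instance

-- ===== CLAIM (what is proved, stated in full; the proofs are below) =====
def Claim_equal_get_possible_actions : Prop := ∀ (state : List (Int × Int)), Dom_get_possible_actions state → Spec_get_possible_actions state (get_possible_actions state)

-- ===== LEMMAS AND PROOFS =====

theorem len_ofList_eq_iff {α : Type} [BEq α] [LawfulBEq α] (xs : List α) :
    (PySem.Set.ofList xs).length = xs.length ↔ xs.Nodup := by
  letI : DecidableEq α := fun a b => decidable_of_iff ((a == b) = true) beq_iff_eq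
  constructor
  · intro h
    have hsub := List.dedup_sublist xs
    have hfs : (PySem.Set.ofList xs).toFinset = xs.toFinset := by
      ext a; simp [PySem.Set.mem_ofList]
    have h1 : (PySem.Set.ofList xs).toFinset.card = (PySem.Set.ofList xs).length :=
      List.toFinset_card_of_nodup (PySem.Set.nodup_ofList xs)
    have h2 : xs.toFinset.card = xs.dedup.length := List.card_toFinset xs
    have h3 : xs.dedup.length = xs.length := by rw [hfs] at h1; omega
    exact List.dedup_eq_self.mp (hsub.eq_of_length h3)
  · intro h
    exact congrArg List.length (PySem.Set.ofList_eq_self_of_nodup (xs := xs) h)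

theorem fold_set (f : Int × Int → Int × Int) (xs : List (Int × Int)) (d : Int × Int) :
    ∀ (m a : Nat) (np : List (Int × Int)), xs.length - a = m → np.length = xs.length →
    (PySem.List.pyRange (a : Int) (xs.length : Int) 1).foldl
        (fun np i => PySem.List.pySetD np i (f (PySem.List.pyGetD xs i d))) np
      = np.take a ++ (xs.drop a).map f := by
  intro m
  induction m with
  | zero =>
    intro a np hm hlen
    rw [PySem.List.pyRange_one_eq_nil (by omega)]
    rw [List.take_of_length_le (by omega : np.length ≤ a),
        List.drop_eq_nil_of_le (by omega : xs.length ≤ a)]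
    simp
  | succ m ih =>
    intro a np hm hlen
    have ha : a < xs.length := by omega
    rw [PySem.List.pyRange_one_cons (by exact_mod_cast ha)]
    simp only [List.foldl_cons]
    have hcast : (a : Int) + 1 = ((a + 1 : Nat) : Int) := by push_cast; ring
    rw [hcast]
    rw [ih (a + 1) _ (by omega) (by simp [hlen])]
    have hget : PySem.List.pyGetD xs (a : Int) d = xs[a] := by
      simp [List.getElem?_eq_getElem ha]
    have hset : PySem.List.pySetD np (a : Int) (f (PySem.List.pyGetD xs (a:Int) d))
        = np.set a (f xs[a]) := by simp [hget]
    rw [hset]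
    have hna : a < np.length := by omega
    have htake : (np.set a (f xs[a])).take (a + 1) = np.take a ++ [f xs[a]] := by
      rw [List.set_eq_take_append_cons_drop, if_pos hna]
      rw [List.take_append]
      simp [Nat.min_eq_left (le_of_lt hna)]
    rw [htake]
    simp only [List.append_assoc, List.singleton_append]
    conv_rhs => rw [List.drop_eq_getElem_cons ha]
    simp
    have hfin : List.drop a (List.map f xs)
        = (List.map f xs)[a]'(by simpa using ha) :: List.drop (a + 1) (List.map f xs) :=
      List.drop_eq_getElem_cons (by simpa using ha)
    simp only [List.getElem_map] at hfin
    rw [hfin]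

theorem map_eta (xs : List (Int × Int)) : xs.map (fun s => (s.1, s.2)) = xs := by simp

theorem isvalid_eq (l : List (Int × Int)) : is_valid_configuration l = decide l.Nodup := by
  unfold is_valid_configuration
  by_cases hnd : l.Nodup
  · simp [PySem.Set.len, hnd, (len_ofList_eq_iff l).mpr hnd]
  · have hne : (PySem.Set.ofList l).length ≠ l.length := fun hc => hnd ((len_ofList_eq_iff l).mp hc)
    simp [PySem.Set.len, hnd]
    omega

def rotFn (cw : Bool) (p : Int × Int) (q : Int × Int) : Int × Int :=
  if cw then (p.1 - (q.2 - p.2), p.2 + (q.1 - p.1)) else (p.1 + (q.2 - p.2), p.2 - (q.1 - p.1))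

theorem rot_inj (cw : Bool) (p : Int × Int) : Function.Injective (rotFn cw p) := by
  intro a b h
  unfold rotFn at h
  cases cw <;> simp [Prod.ext_iff] at h ⊢ <;> omega

theorem validate_eq (state : List (Int × Int)) (cw : Bool) (k : Nat) (h1 : 0 < k)
    (h2 : k + 1 < state.length) :
    validate_action state ((k : Int), cw)
      = decide ((state.take (k+1)).Nodup ∧ (state.drop (k+1)).Nodup ∧
          ∀ x ∈ state.take (k+1), x ∉ (state.drop (k+1)).map (rotFn cw (state.getD k (0,0)))) := by
  unfold validate_action
  simp only [map_eta, PySem.List.len_eq]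
  rw [if_neg (by omega)]
  simp only [PySem.List.pyGetD_natCast]
  have hbody : (fun (np : List (Int × Int)) (i : Int) =>
      if cw = true then
        PySem.List.pySetD np i
          ((state.getD k (0, 0)).1 - ((PySem.List.pyGetD state i (0, 0)).2 - (state.getD k (0, 0)).2),
            (state.getD k (0, 0)).2 + ((PySem.List.pyGetD state i (0, 0)).1 - (state.getD k (0, 0)).1))
      else
        PySem.List.pySetD np i
          ((state.getD k (0, 0)).1 + ((PySem.List.pyGetD state i (0, 0)).2 - (state.getD k (0, 0)).2),
            (state.getD k (0, 0)).2 - ((PySem.List.pyGetD state i (0, 0)).1 - (state.getD k (0, 0)).1)))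
      = fun np i => PySem.List.pySetD np i
          (rotFn cw (state.getD k (0, 0)) (PySem.List.pyGetD state i ((0 : Int), (0 : Int)))) := by
    funext np i
    cases cw <;> simp [rotFn]
  rw [hbody]
  have hc2 : (k : Int) + 1 = ((k + 1 : Nat) : Int) := by push_cast; ring
  rw [hc2, fold_set (rotFn cw (state.getD k (0, 0))) state (0, 0)
        (state.length - (k + 1)) (k + 1) state rfl rfl]
  rw [isvalid_eq, decide_eq_decide, List.nodup_append]
  have hmap : ((state.drop (k + 1)).map (rotFn cw (state.getD k (0, 0)))).Nodup
      ↔ (state.drop (k + 1)).Nodup := List.nodup_map_iff (rot_inj cw _)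
  rw [hmap]
  exact and_congr_right fun _ => and_congr_right fun _ =>
    ⟨fun h x hx hm => h x hx x hm rfl, fun h a ha b hb heq => h a ha (heq ▸ hb)⟩

theorem validate_left (state : List (Int × Int)) (cw : Bool) (i : Int) (h : i ≤ 0) :
    validate_action state (i, cw) = false := by
  unfold validate_action
  simp only [map_eta, PySem.List.len_eq]
  rw [if_pos (Or.inl h)]

theorem validate_right (state : List (Int × Int)) (cw : Bool) (i : Int)
    (h : (state.length : Int) - 1 ≤ i) : validate_action state (i, cw) = false := by
  unfold validate_action
  simp only [map_eta, PySem.List.len_eq]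
  rw [if_pos (Or.inr h)]

theorem foldl_body_flatMap {α β : Type} (f : List β → α → List β) (g : α → List β)
    (h : ∀ acc x, f acc x = acc ++ g x) :
    ∀ (l : List α) (acc : List β), l.foldl f acc = acc ++ l.flatMap g := by
  intro l
  induction l with
  | nil => intro acc; simp
  | cons x xs ih => intro acc; rw [List.foldl_cons, h, ih, List.flatMap_cons, List.append_assoc]

def gA (state : List (Int × Int)) (j : Int) : List (Int × Bool) :=
  (if validate_action state (j, true) then [(j, true)] else [])
    ++ (if validate_action state (j, false) then [(j, false)] else [])

theorem A_flat (state : List (Int × Int)) :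
    get_possible_actions state
      = (PySem.List.pyRange 0 (state.length : Int) 1).flatMap (gA state) := by
  unfold get_possible_actions
  rw [foldl_body_flatMap _ (fun ip => gA state ip.1)
      (by
        intro acc ip
        unfold gA
        by_cases hT : validate_action state (ip.1, true) = true <;>
          by_cases hF : validate_action state (ip.1, false) = true <;>
            simp [hT, hF])]
  rw [PySem.List.enumerate_eq_map_pyRange (xs := state) ((0 : Int), (0 : Int))]
  simp [List.flatMap_map]

theorem flatMap_congr' {α β : Type} {l : List α} {f g : α → List β}
    (h : ∀ x ∈ l, f x = g x) : l.flatMap f = l.flatMap g := by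
  induction l with
  | nil => rfl
  | cons x xs ih =>
    rw [List.flatMap_cons, List.flatMap_cons, h x (by simp), ih (fun y hy => h y (by simp [hy]))]

theorem gA_left (state : List (Int × Int)) (j : Int) (h : j ≤ 0) : gA state j = [] := by
  unfold gA
  rw [validate_left state true j h, validate_left state false j h]
  simp

theorem gA_last (state : List (Int × Int)) (j : Int) (h : (state.length : Int) - 1 ≤ j) :
    gA state j = [] := by
  unfold gA
  rw [validate_right state true j h, validate_right state false j h]
  simp

-- ===== B-side lemmas =====

-- the number of excess (repeated) occurrences of a list — what B's `dup` counter tracks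
def excess (l : List (Int × Int)) : Int := (l.length : Int) - (l.toFinset.card : Int)

theorem excess_zero_iff (l : List (Int × Int)) : excess l = 0 ↔ l.Nodup := by
  unfold excess
  rw [List.card_toFinset]
  have hsub := List.dedup_sublist l
  have hle := hsub.length_le
  constructor
  · intro h
    exact List.dedup_eq_self.mp (hsub.eq_of_length (by omega))
  · intro h
    rw [List.dedup_eq_self.mpr h]
    omega

theorem excess_snoc (m : List (Int × Int)) (q : Int × Int) :
    excess (m ++ [q]) = excess m + (if q ∈ m then 1 else 0) := by
  unfold excess
  rw [List.toFinset_append]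
  simp only [List.toFinset_cons, List.toFinset_nil, insert_empty_eq]
  rw [Finset.union_comm, Finset.singleton_union]
  by_cases hq : q ∈ m
  · rw [Finset.insert_eq_self.mpr (List.mem_toFinset.mpr hq), if_pos hq]
    simp
    omega
  · rw [Finset.card_insert_of_notMem (fun hc => hq (List.mem_toFinset.mp hc)), if_neg hq]
    simp

theorem excess_cons (q : Int × Int) (t : List (Int × Int)) :
    excess (q :: t) = excess t + (if q ∈ t then 1 else 0) := by
  unfold excess
  rw [List.toFinset_cons]
  by_cases hq : q ∈ t
  · rw [Finset.insert_eq_self.mpr (List.mem_toFinset.mpr hq), if_pos hq]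
    simp
    omega
  · rw [Finset.card_insert_of_notMem (fun hc => hq (List.mem_toFinset.mp hc)), if_neg hq]
    simp

-- the build fold produces the counts and the excess counter of the processed list
theorem buildB (l : List (Int × Int)) :
    ∀ (m : List (Int × Int)) (d : PySem.Dict (Int × Int) Int) (t : Int),
      (∀ x, d.getD x 0 = (m.count x : Int)) → t = excess m →
      (∀ x, (l.foldl
          (fun (sd : PySem.Dict (Int × Int) Int × Int) q =>
            let c := sd.1.getD q 0
            let dup := if 0 < c then sd.2 + 1 else sd.2
            (sd.1.insert q (c + 1), dup)) (d, t)).1.getD x 0 = ((m ++ l).count x : Int))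
      ∧ (l.foldl
          (fun (sd : PySem.Dict (Int × Int) Int × Int) q =>
            let c := sd.1.getD q 0
            let dup := if 0 < c then sd.2 + 1 else sd.2
            (sd.1.insert q (c + 1), dup)) (d, t)).2 = excess (m ++ l) := by
  induction l with
  | nil =>
    intro m d t hd ht
    simp only [List.foldl_nil, List.append_nil]
    exact ⟨hd, ht⟩
  | cons q ls ih =>
    intro m d t hd ht
    simp only [List.foldl_cons]
    have hstep : ∀ x, (d.insert q (d.getD q 0 + 1)).getD x 0 = ((m ++ [q]).count x : Int) := by
      intro x
      rw [PySem.Dict.getD_insert]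
      by_cases hx : x = q
      · subst hx
        rw [if_pos rfl, hd, List.count_append]
        simp
      · rw [if_neg hx, hd, List.count_append, List.count_singleton]
        simp [Ne.symm hx]
    have hdup : (if 0 < d.getD q 0 then t + 1 else t) = excess (m ++ [q]) := by
      rw [excess_snoc, ht, hd q]
      by_cases hq : q ∈ m
      · rw [if_pos (by exact_mod_cast List.count_pos_iff.mpr hq), if_pos hq]
      · rw [if_neg (by rw [List.count_eq_zero.mpr hq]; omega), if_neg hq]
        omega
    have hA : m ++ q :: ls = (m ++ [q]) ++ ls := by simp
    rw [hA]
    exact ih (m ++ [q]) (d.insert q (d.getD q 0 + 1)) _ hstep hdup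

-- the cross test over the seen-set equals gA's collision-freeness condition
theorem cross_iff (t pre : List (Int × Int)) (seen : List (Int × Int))
    (suffix : PySem.Dict (Int × Int) Int) (cw : Bool) (p : Int × Int)
    (g : Int × Int → Int × Int)
    (hseen : ∀ x, x ∈ seen ↔ x ∈ pre)
    (hsuf : ∀ x, suffix.getD x 0 = (t.count x : Int))
    (hg : ∀ a, rotFn cw p (g a) = a) :
    (seen.all (fun a => suffix.getD (g a) 0 == 0) = true)
      ↔ ∀ x ∈ pre, x ∉ t.map (rotFn cw p) := by
  rw [List.all_eq_true]
  constructor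
  · intro h x hx hm
    have hx' := h x ((hseen x).mpr hx)
    rw [beq_iff_eq, hsuf] at hx'
    have hcnt : t.count (g x) = 0 := by exact_mod_cast hx'
    obtain ⟨q, hq, hrot⟩ := List.mem_map.mp hm
    have hqg : q = g x := rot_inj cw p (by rw [hrot, hg])
    exact absurd (hqg ▸ hq) (List.count_eq_zero.mp hcnt)
  · intro h a ha
    rw [beq_iff_eq, hsuf]
    have hcnt : t.count (g a) = 0 := by
      rw [List.count_eq_zero]
      intro hc
      exact h a ((hseen a).mp ha) (List.mem_map.mpr ⟨_, hc, hg a⟩)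
    exact_mod_cast hcnt

theorem nodup_take_succ (pos : List (Int × Int)) (k : Nat) (hk : k < pos.length) :
    (pos.take (k + 1)).Nodup ↔ (pos.take k).Nodup ∧ pos[k] ∉ pos.take k := by
  rw [List.take_add_one, List.getElem?_eq_getElem hk, Option.toList_some, List.nodup_append]
  simp only [List.nodup_singleton, true_and]
  refine and_congr_right fun _ =>
    ⟨fun h hm => h pos[k] hm pos[k] (List.mem_singleton_self _) rfl, fun h a hma b hmb he => ?_⟩
  rw [List.mem_singleton] at hmb
  exact h (hmb ▸ he ▸ hma)

-- B's loop, started in a state representing pivot k, appends exactly gA of the remaining pivots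
theorem loopB (pos : List (Int × Int)) :
    ∀ (fuel k : Nat), (pos.length - 1) - k = fuel → 1 ≤ k →
    ∀ (suffix : PySem.Dict (Int × Int) Int) (dup : Int) (seen : PySem.Set (Int × Int))
      (ok : Bool) (acc : List (Int × Bool)),
      (∀ x, suffix.getD x 0 = ((pos.drop (k + 1)).count x : Int)) →
      dup = excess (pos.drop (k + 1)) →
      (∀ x, x ∈ seen ↔ x ∈ pos.take k) →
      ok = decide (pos.take k).Nodup →
      ((PySem.List.pyRange (k : Int) ((pos.length : Int) - 1) 1).foldl (bStep pos)
          ((suffix, dup), (seen, ok), acc)).2.2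
        = acc ++ (PySem.List.pyRange (k : Int) ((pos.length : Int) - 1) 1).flatMap (gA pos) := by
  intro fuel
  induction fuel with
  | zero =>
    intro k hfuel hk suffix dup seen ok acc _ _ _ _
    rw [PySem.List.pyRange_one_eq_nil (by omega)]
    simp
  | succ fuel ih =>
    intro k hfuel hk suffix dup seen ok acc hsuf hdup hseen hok
    have hklt : k + 1 < pos.length := by omega
    have hkl : (k : Int) < (pos.length : Int) - 1 := by omega
    rw [PySem.List.pyRange_one_cons hkl]
    simp only [List.foldl_cons, List.flatMap_cons]
    have hp : PySem.List.pyGetD pos (k : Int) ((0 : Int), (0 : Int)) = pos.getD k (0, 0) :=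
      PySem.List.pyGetD_natCast pos k (0, 0)
    have hpk : pos.getD k (0, 0) = pos[k] := List.getD_eq_getElem pos (0, 0) (by omega)
    have hq : PySem.List.pyGetD pos ((k : Int) + 1) ((0 : Int), (0 : Int)) = pos[k + 1] := by
      rw [show (k : Int) + 1 = ((k + 1 : Nat) : Int) by push_cast; ring,
          PySem.List.pyGetD_natCast pos (k + 1) (0, 0)]
      exact List.getD_eq_getElem pos (0, 0) hklt
    have hdropc : pos.drop (k + 1) = pos[k + 1] :: pos.drop (k + 2) :=
      List.drop_eq_getElem_cons hklt
    have hsucc : pos.take (k + 1) = pos.take k ++ [pos[k]] := by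
      rw [List.take_add_one, List.getElem?_eq_getElem (show k < pos.length by omega),
          Option.toList_some]
    -- the new prefix flag
    have hcont : PySem.Set.contains seen (PySem.List.pyGetD pos (k : Int) (0, 0)) = true
        ↔ pos[k] ∈ pos.take k := by
      rw [hp, hpk, PySem.Set.contains_iff seen pos[k]]
      exact hseen _
    have hok' : (if PySem.Set.contains seen (PySem.List.pyGetD pos (k : Int) (0, 0)) then false else ok)
        = decide (pos.take (k + 1)).Nodup := by
      have hiff := nodup_take_succ pos k (by omega)
      by_cases hmem : pos[k] ∈ pos.take k
      · rw [if_pos (hcont.mpr hmem)]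
        simp [hiff, hmem]
      · rw [if_neg (fun hc => hmem (hcont.mp hc)), hok]
        simp [hiff, hmem]
    -- the new seen set
    have hseen' : ∀ x, x ∈ PySem.Set.add seen (PySem.List.pyGetD pos (k : Int) (0, 0))
        ↔ x ∈ pos.take (k + 1) := by
      intro x
      rw [hp, hpk, PySem.Set.mem_add, hseen, hsucc, List.mem_append, List.mem_singleton]
    -- dup == 0 means the suffix is duplicate-free
    have hdup0 : ((dup == 0) = true) ↔ (pos.drop (k + 1)).Nodup := by
      rw [beq_iff_eq, hdup]
      exact excess_zero_iff _
    -- the three components of this step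
    have hstep1 : (bStep pos ((suffix, dup), (seen, ok), acc) (k : Int)).1
        = (suffix.insert pos[k + 1] (suffix.getD pos[k + 1] 0 - 1),
           if 1 < suffix.getD pos[k + 1] 0 then dup - 1 else dup) := by
      simp only [bStep]
      rw [hq]
    have hstep21 : (bStep pos ((suffix, dup), (seen, ok), acc) (k : Int)).2.1
        = (PySem.Set.add seen (PySem.List.pyGetD pos (k : Int) (0, 0)),
           decide (pos.take (k + 1)).Nodup) := by
      simp only [bStep]
      rw [hok']
    have hstep22 : (bStep pos ((suffix, dup), (seen, ok), acc) (k : Int)).2.2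
        = acc ++ gA pos (k : Int) := by
      simp only [bStep]
      rw [hok']
      unfold gA
      rw [validate_eq pos true k (by omega) hklt, validate_eq pos false k (by omega) hklt]
      by_cases hOK : (pos.take (k + 1)).Nodup
      · by_cases hD : (dup == 0) = true
        · have hS : (pos.drop (k + 1)).Nodup := hdup0.mp hD
          rw [if_pos (by simp [hOK, hD])]
          have hallT := cross_iff (pos.drop (k + 1)) (pos.take (k + 1))
            (PySem.Set.add seen (PySem.List.pyGetD pos (k : Int) (0, 0))) suffix true
            (pos.getD k (0, 0))
            (fun a => (a.2 - ((PySem.List.pyGetD pos (k : Int) (0, 0)).2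
                  - (PySem.List.pyGetD pos (k : Int) (0, 0)).1),
              (PySem.List.pyGetD pos (k : Int) (0, 0)).1
                  + (PySem.List.pyGetD pos (k : Int) (0, 0)).2 - a.1))
            hseen' hsuf
            (by intro a; obtain ⟨a1, a2⟩ := a; simp [rotFn]; constructor <;> ring)
          have hallF := cross_iff (pos.drop (k + 1)) (pos.take (k + 1))
            (PySem.Set.add seen (PySem.List.pyGetD pos (k : Int) (0, 0))) suffix false
            (pos.getD k (0, 0))
            (fun a => ((PySem.List.pyGetD pos (k : Int) (0, 0)).1
                  + (PySem.List.pyGetD pos (k : Int) (0, 0)).2 - a.2,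
              a.1 + ((PySem.List.pyGetD pos (k : Int) (0, 0)).2
                  - (PySem.List.pyGetD pos (k : Int) (0, 0)).1)))
            hseen' hsuf
            (by intro a; obtain ⟨a1, a2⟩ := a; simp [rotFn]; constructor <;> ring)
          by_cases hT : ∀ x ∈ pos.take (k + 1),
              x ∉ (pos.drop (k + 1)).map (rotFn true (pos.getD k (0,0)))
          · by_cases hF : ∀ x ∈ pos.take (k + 1),
                x ∉ (pos.drop (k + 1)).map (rotFn false (pos.getD k (0,0)))
            · rw [if_pos (hallT.mpr hT), if_pos (hallF.mpr hF),
                  if_pos (decide_eq_true ⟨hOK, hS, hT⟩), if_pos (decide_eq_true ⟨hOK, hS, hF⟩)]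
              simp
            · rw [if_pos (hallT.mpr hT), if_neg (fun hc => hF (hallF.mp hc)),
                  if_pos (decide_eq_true ⟨hOK, hS, hT⟩),
                  if_neg (fun hc => hF (of_decide_eq_true hc).2.2)]
              simp
          · by_cases hF : ∀ x ∈ pos.take (k + 1),
                x ∉ (pos.drop (k + 1)).map (rotFn false (pos.getD k (0,0)))
            · rw [if_neg (fun hc => hT (hallT.mp hc)), if_pos (hallF.mpr hF),
                  if_neg (fun hc => hT (of_decide_eq_true hc).2.2),
                  if_pos (decide_eq_true ⟨hOK, hS, hF⟩)]
              simp
            · rw [if_neg (fun hc => hT (hallT.mp hc)), if_neg (fun hc => hF (hallF.mp hc)),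
                  if_neg (fun hc => hT (of_decide_eq_true hc).2.2),
                  if_neg (fun hc => hF (of_decide_eq_true hc).2.2)]
              simp
        · have hS : ¬ (pos.drop (k + 1)).Nodup := fun hc => hD (hdup0.mpr hc)
          rw [if_neg (by simp [hD]),
              if_neg (fun hc => hS (of_decide_eq_true hc).2.1),
              if_neg (fun hc => hS (of_decide_eq_true hc).2.1)]
          simp
      · rw [if_neg (by simp [hOK]),
            if_neg (fun hc => hOK (of_decide_eq_true hc).1),
            if_neg (fun hc => hOK (of_decide_eq_true hc).1)]
        simp
    have hstep : bStep pos ((suffix, dup), (seen, ok), acc) (k : Int)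
        = ((suffix.insert pos[k + 1] (suffix.getD pos[k + 1] 0 - 1),
             if 1 < suffix.getD pos[k + 1] 0 then dup - 1 else dup),
           (PySem.Set.add seen (PySem.List.pyGetD pos (k : Int) (0, 0)),
            decide (pos.take (k + 1)).Nodup),
           acc ++ gA pos (k : Int)) :=
      Prod.ext_iff.mpr ⟨hstep1, Prod.ext_iff.mpr ⟨hstep21, hstep22⟩⟩
    rw [hstep]
    -- invariants for the next pivot
    have hc : suffix.getD pos[k + 1] 0 = ((pos.drop (k + 2)).count pos[k + 1] : Int) + 1 := by
      rw [hsuf, hdropc, List.count_cons_self]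
      push_cast
      ring
    have hsuf' : ∀ x, (suffix.insert pos[k + 1] (suffix.getD pos[k + 1] 0 - 1)).getD x 0
        = ((pos.drop (k + 2)).count x : Int) := by
      intro x
      rw [PySem.Dict.getD_insert]
      by_cases hx : x = pos[k + 1]
      · subst hx
        rw [if_pos rfl, hc]
        ring
      · rw [if_neg hx, hsuf, hdropc, List.count_cons_of_ne (Ne.symm hx)]
    have hdup' : (if 1 < suffix.getD pos[k + 1] 0 then dup - 1 else dup)
        = excess (pos.drop (k + 2)) := by
      rw [hc, hdup, hdropc, excess_cons]
      by_cases hm : pos[k + 1] ∈ pos.drop (k + 2)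
      · rw [if_pos (by have := List.count_pos_iff.mpr hm; omega), if_pos hm]
        ring
      · rw [if_neg (by rw [List.count_eq_zero.mpr hm]; omega), if_neg hm]
        omega
    have hcast : (k : Int) + 1 = ((k + 1 : Nat) : Int) := by push_cast; ring
    rw [hcast, ih (k + 1) (by omega) (by omega) _ _ _ _ _
          (by simpa using hsuf') (by simpa using hdup') hseen' rfl]
    rw [List.append_assoc]

-- assemble B
theorem B_flat (state : List (Int × Int)) :
    get_possible_actions_alt state
      = (PySem.List.pyRange 1 ((state.length : Int) - 1) 1).flatMap (gA state) := by
  unfold get_possible_actions_alt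
  simp only [map_eta, PySem.List.len_eq]
  have h2 : PySem.List.slice state (some 2) none = state.drop 2 := by
    rw [show (2 : Int) = ((2 : Nat) : Int) from rfl, PySem.List.slice_from_natCast]
  have h1 : PySem.List.slice state none (some 1) = state.take 1 := by
    rw [show (1 : Int) = ((1 : Nat) : Int) from rfl, PySem.List.slice_to_natCast]
  rw [h2, h1]
  obtain ⟨hbuild1, hbuild2⟩ := buildB (state.drop 2) [] PySem.Dict.empty 0
    (by intro x; simp [PySem.Dict.getD_empty]) (by simp [excess])
  simp only [List.nil_append] at hbuild1 hbuild2
  have hstart := loopB state ((state.length - 1) - 1) 1 rfl le_rfl _ _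
    (PySem.Set.ofList (state.take 1)) true []
    (by simpa using hbuild1) (by simpa using hbuild2)
    (fun x => PySem.Set.mem_ofList _ x)
    (by
      cases state with
      | nil => simp
      | cons a t => simp)
  simpa using hstart

theorem main_eq (state : List (Int × Int)) :
    get_possible_actions state = get_possible_actions_alt state := by
  rw [A_flat, B_flat]
  by_cases hn : state.length ≤ 1
  · have hB : PySem.List.pyRange 1 ((state.length : Int) - 1) 1 = [] :=
      PySem.List.pyRange_one_eq_nil (by omega)
    rw [hB]
    have hA : ∀ j ∈ PySem.List.pyRange 0 (state.length : Int) 1, gA state j = [] := by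
      intro j hj
      rw [PySem.List.mem_pyRange_one] at hj
      exact gA_left state j (by omega)
    rw [flatMap_congr' hA]
    simp
  · have hsplit1 : PySem.List.pyRange 0 (state.length : Int) 1
        = PySem.List.pyRange 0 1 1 ++ PySem.List.pyRange 1 (state.length : Int) 1 :=
      PySem.List.pyRange_one_append 0 1 (state.length : Int) (by omega) (by exact_mod_cast by omega)
    have hsplit2 : PySem.List.pyRange 1 (state.length : Int) 1
        = PySem.List.pyRange 1 ((state.length : Int) - 1) 1
            ++ PySem.List.pyRange ((state.length : Int) - 1) (state.length : Int) 1 :=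
      PySem.List.pyRange_one_append 1 ((state.length : Int) - 1) (state.length : Int)
        (by omega) (by omega)
    have e1 : PySem.List.pyRange 0 1 1 = [0] := by decide
    obtain ⟨m, hm⟩ : ∃ m : Int, (state.length : Int) = m + 1 := ⟨(state.length : Int) - 1, by ring⟩
    have e2 : PySem.List.pyRange ((state.length : Int) - 1) (state.length : Int) 1
        = [(state.length : Int) - 1] := by
      rw [hm]
      rw [show m + 1 - 1 = m from by ring]
      exact PySem.List.pyRange_one_singleton m
    rw [hsplit1, hsplit2, e1, e2, List.flatMap_append, List.flatMap_append]
    rw [show [(0 : Int)].flatMap (gA state) = [] by simp [gA_left state 0 le_rfl]]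
    rw [show [(state.length : Int) - 1].flatMap (gA state) = [] by simp [gA_last state _ le_rfl]]
    simp

-- ===== VERDICT (by name: the statement is the Claim_ definition above) =====
theorem get_possible_actions_spec : Claim_equal_get_possible_actions := by
  intro state _
  unfold Spec_get_possible_actions
  exact main_eq state
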